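-- pv_equiv track=rewrite | github.com/heitorchang/learn-code | battles/challenges/caucusRace_dp.py | process
-- ===== SOURCE A (Python) =====
-- def process(A):
--     N = len(A)
--     M = [[50000000 for _ in range(N)] for _ in range(N)]
--     for i in range(N):
--         M[i][i] = A[i]
--     for i in range(N):
--         for j in range(i+1, N):
--             if A[j] < M[i][j-1]:
--                 M[i][j] = A[j]
--             else:
--                 M[i][j] = M[i][j-1]
--     return M
-- ===== SOURCE B (Python) =====
-- def process(A):
--     N = len(A)
--     rows = []
--     tail = []  # running-min suffix row below: tail[k] = min(A[i+1..i+1+k]) for previous i+1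
--     for i in range(N - 1, -1, -1):
--         tail = [A[i]] + [min(A[i], v) for v in tail]
--         rows.append([50000000] * i + tail)
--     rows.reverse()
--     return rows
-- ===== Notes on version B (the rewrite author's own statement) =====
-- stated objective: alternative
-- what changed: Replaces the left-to-right horizontal DP M[i][j]=min(A[j],M[i][j-1]) with a vertical DP built bottom-up: each row's suffix of minima is derived from the row below by an elementwise min with A[i] (no scan over A, no read-back at column j-1), rows collected in reverse and flipped at the end.
import Mathlib
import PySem

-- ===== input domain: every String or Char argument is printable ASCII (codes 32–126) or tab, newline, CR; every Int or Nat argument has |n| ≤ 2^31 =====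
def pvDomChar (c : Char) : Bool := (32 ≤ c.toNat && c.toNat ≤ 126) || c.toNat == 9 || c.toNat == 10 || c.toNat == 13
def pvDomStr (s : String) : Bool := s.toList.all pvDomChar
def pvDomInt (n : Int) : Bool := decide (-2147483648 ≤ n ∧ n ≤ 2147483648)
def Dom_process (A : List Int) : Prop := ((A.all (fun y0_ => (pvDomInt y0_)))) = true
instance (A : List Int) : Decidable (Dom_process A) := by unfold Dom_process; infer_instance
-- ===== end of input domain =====

-- B replaces A's horizontal DP (M[i][j] from M[i][j-1]) by a vertical DP: rows are built
-- bottom-up, each from the row below by an elementwise min, then reversed; objective: alternative.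

-- ===== PORT A =====
-- literal transliteration of A: sentinel matrix, diagonal pass, then the DP pass reading M[i][j-1]
def process (A : List Int) : List (List Int) :=
  let N := A.length
  let M0 := (List.range N).map (fun _ => (List.range N).map (fun _ => (50000000 : Int)))
  let M1 := (List.range N).foldl (fun M i => M.set i ((M.getD i []).set i (A.getD i 0))) M0
  (List.range N).foldl (fun M i =>
    (List.range' (i + 1) (N - (i + 1))).foldl (fun M j =>
      let r := M.getD i []
      if A.getD j 0 < r.getD (j - 1) 0 then M.set i (r.set j (A.getD j 0))
      else M.set i (r.set j (r.getD (j - 1) 0))) M) M1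

-- ===== PORT B =====
-- transliteration of Source B: descending loop, tail = [A[i]] + [min(A[i],v) for v in tail],
-- rows.append([50000000]*i + tail), final rows.reverse()
def process_alt (A : List Int) : List (List Int) :=
  let N := A.length
  let st := (List.range N).reverse.foldl
    (fun (st : List Int × List (List Int)) i =>
      let tail := A.getD i 0 :: st.1.map (fun v => min (A.getD i 0) v)
      (tail, st.2 ++ [List.replicate i (50000000 : Int) ++ tail]))
    ([], [])
  st.2.reverse

-- ===== PRECONDITION & SPEC =====
def Spec_process (A : List Int) (out : List (List Int)) : Prop := out = process_alt A
instance (A : List Int) (out : List (List Int)) : Decidable (Spec_process A out) := by unfold Spec_process; infer_instance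

-- ===== CLAIM (what is proved, stated in full; the proofs are below) =====
def Claim_equal_process : Prop := ∀ (A : List Int), Dom_process A → Spec_process A (process A)

-- ===== LEMMAS AND PROOFS =====

-- running-minimum scan, written with A's exact branch test
def scanMin : Int → List Int → List Int
  | _, [] => []
  | c, x :: xs => (if x < c then x else c) :: scanMin (if x < c then x else c) xs

-- the common closed form of row i
def rowC (A : List Int) (i : Nat) : List Int :=
  List.replicate i (50000000 : Int) ++
    A.getD i 0 :: scanMin (A.getD i 0)
      ((List.range' (i + 1) (A.length - (i + 1))).map (fun j => A.getD j 0))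

-- a fold over indices that only touches row i is a fold on that row
theorem mat_to_row (stepR : List Int → Nat → List Int) (i : Nat) :
    ∀ (js : List Nat) (M : List (List Int)),
    js.foldl (fun M j => M.set i (stepR (M.getD i []) j)) M
      = M.set i (js.foldl stepR (M.getD i [])) := by
  intro js
  induction js with
  | nil =>
      intro M
      simp only [List.foldl_nil]
      by_cases h : i < M.length
      · rw [List.getD_eq_getElem _ _ h, List.set_getElem_self]
      · rw [List.set_eq_of_length_le (le_of_not_gt h)]
  | cons j js ih =>
      intro M
      simp only [List.foldl_cons]
      rw [ih]
      by_cases h : i < M.length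
      · rw [List.set_set, List.getD_eq_getElem _ _ (by simpa using h),
          List.getElem_set_self]
      · rw [List.set_eq_of_length_le (le_of_not_gt h),
          List.set_eq_of_length_le (le_of_not_gt h),
          List.set_eq_of_length_le (le_of_not_gt h)]

-- fold of per-row updates over range = mapIdx
theorem set_fold (f : Nat → List Int → List Int) :
    ∀ (n : Nat) (M : List (List Int)), n ≤ M.length →
    (List.range n).foldl (fun M i => M.set i (f i (M.getD i []))) M
      = (M.take n).mapIdx f ++ M.drop n := by
  intro n
  induction n with
  | zero => intro M _; simp
  | succ n ih =>
      intro M h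
      have hn : n < M.length := h
      rw [List.range_succ, List.foldl_append, ih M (le_of_lt hn)]
      have hp : ((M.take n).mapIdx f).length = n := by
        simp [Nat.min_eq_left (le_of_lt hn)]
      simp only [List.foldl_cons, List.foldl_nil]
      rw [List.getD_append_right _ _ _ _ (by omega), hp, Nat.sub_self,
        List.drop_eq_getElem_cons hn, List.getD_cons_zero, List.set_append]
      rw [if_neg (by omega), hp, Nat.sub_self, List.set_cons_zero]
      rw [List.take_add_one, List.getElem?_eq_getElem hn, Option.toList_some,
        List.mapIdx_append]
      simp [Nat.min_eq_left (le_of_lt hn)]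

-- A's row step
def stepA (A : List Int) (r : List Int) (j : Nat) : List Int :=
  if A.getD j 0 < r.getD (j - 1) 0 then r.set j (A.getD j 0)
  else r.set j (r.getD (j - 1) 0)

-- A's inner loop on a row: prefix of settled minima + sentinel tail
theorem A_inner (A : List Int) : ∀ (t : Nat) (pref : List Int) (c : Int),
    1 ≤ pref.length → pref.getD (pref.length - 1) 0 = c →
    (List.range' pref.length t).foldl (stepA A) (pref ++ List.replicate t (50000000 : Int))
      = pref ++ scanMin c ((List.range' pref.length t).map (fun j => A.getD j 0)) := by
  intro t
  induction t with
  | zero => intro pref c _ _; simp [scanMin]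
  | succ t ih =>
      intro pref c hlen hlast
      rw [List.range'_succ]
      simp only [List.foldl_cons, List.map_cons, scanMin]
      have hprev : (pref ++ List.replicate (t + 1) (50000000 : Int)).getD (pref.length - 1) 0 = c := by
        rw [List.getD_append _ _ _ _ (by omega)]; exact hlast
      set v : Int := if A.getD pref.length 0 < c then A.getD pref.length 0 else c with hv
      have hstep : stepA A (pref ++ List.replicate (t + 1) (50000000 : Int)) pref.length
          = (pref ++ [v]) ++ List.replicate t (50000000 : Int) := by
        unfold stepA
        rw [hprev, List.set_append]
        simp only [lt_irrefl, if_false, Nat.sub_self, List.replicate_succ, List.set_cons_zero, hv]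
        split <;> simp
      rw [hstep]
      have := ih (pref ++ [v]) v (by simp) (by simp)
      simp only [List.length_append, List.length_cons, List.length_nil, Nat.zero_add] at this
      rw [this]
      simp

-- (replicate N S).set i a in split form
theorem replicate_set (S a : Int) : ∀ (N i : Nat), i < N →
    (List.replicate N S).set i a
      = (List.replicate i S ++ [a]) ++ List.replicate (N - (i + 1)) S := by
  intro N
  induction N with
  | zero => intro i h; omega
  | succ N ih =>
      intro i h
      cases i with
      | zero => simp [List.replicate_succ]
      | succ i =>
          rw [List.replicate_succ, List.set_cons_succ, ih i (by omega)]
          simp [List.replicate_succ]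

-- A's result in closed form
theorem process_eq_rowC (A : List Int) :
    process A = (List.range A.length).map (rowC A) := by
  unfold process
  simp only []
  set N := A.length with hN
  set S : Int := 50000000 with hS
  have hM0 : (List.range N).map (fun _ => (List.range N).map (fun _ => S))
      = List.replicate N (List.replicate N S) := by
    rw [List.map_const', List.map_const']; simp
  rw [hM0]
  have hM1 : (List.range N).foldl (fun M i => M.set i ((M.getD i []).set i (A.getD i 0)))
        (List.replicate N (List.replicate N S))
      = List.mapIdx (fun i r => r.set i (A.getD i 0)) (List.replicate N (List.replicate N S)) := by
    rw [set_fold (fun i r => r.set i (A.getD i 0)) N _ (by simp)]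
    simp
  rw [hM1]
  set M1 := List.mapIdx (fun i r => r.set i (A.getD i 0)) (List.replicate N (List.replicate N S)) with hM1d
  have hlen1 : M1.length = N := by simp [hM1d]
  have hbody : (fun (M : List (List Int)) (i : Nat) =>
        (List.range' (i + 1) (N - (i + 1))).foldl (fun M j =>
          let r := M.getD i []
          if A.getD j 0 < r.getD (j - 1) 0 then M.set i (r.set j (A.getD j 0))
          else M.set i (r.set j (r.getD (j - 1) 0))) M)
      = (fun (M : List (List Int)) (i : Nat) =>
          M.set i ((List.range' (i + 1) (N - (i + 1))).foldl (stepA A) (M.getD i []))) := by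
    funext M i
    rw [← mat_to_row (stepA A) i]
    apply PySem.List.foldl_congr_mem
    intro M' j _
    simp only [stepA]
    split <;> rfl
  rw [hbody]
  have hfold := set_fold (fun i r => (List.range' (i + 1) (N - (i + 1))).foldl (stepA A) r)
    N M1 (le_of_eq hlen1.symm)
  simp only [] at hfold
  rw [hfold, List.take_of_length_le (le_of_eq hlen1),
    List.drop_of_length_le (le_of_eq hlen1), List.append_nil]
  apply List.ext_getElem
  · simp [hlen1]
  · intro i h1 h2
    simp only [List.getElem_mapIdx, List.getElem_map, List.getElem_range]
    have hiN : i < N := by simpa [hlen1] using h1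
    have hMi : M1[i] = (List.replicate N S).set i (A.getD i 0) := by
      simp [hM1d, List.getElem_mapIdx]
    rw [hMi, replicate_set S (A.getD i 0) N i hiN]
    have := A_inner A (N - (i + 1)) (List.replicate i S ++ [A.getD i 0]) (A.getD i 0)
      (by simp) (by simp)
    simp only [List.length_append, List.length_replicate, List.length_cons, List.length_nil,
      Nat.zero_add] at this
    rw [this]
    simp [rowC, hS, hN]

-- ===== B-side lemmas =====

-- full running-min scan including the first element
def runMin : List Int → List Int
  | [] => []
  | x :: xs => x :: scanMin x xs

-- scanning from a smaller seed = mapping min over the scan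
theorem map_min_scanMin (a : Int) : ∀ (xs : List Int) (c : Int),
    (scanMin c xs).map (fun v => min a v) = scanMin (min a c) xs := by
  intro xs
  induction xs with
  | nil => intro c; simp [scanMin]
  | cons x xs ih =>
      intro c
      simp only [scanMin, List.map_cons, ih]
      have h1 : min a (if x < c then x else c) = min a (min c x) := by
        rw [min_def (a := c)]; split_ifs <;> try rfl
        all_goals omega
      have h2 : (if x < min a c then x else min a c) = min (min a c) x := by
        rw [min_def (a := min a c)]; split_ifs <;> try rfl
        all_goals omega
      rw [h1, h2, ← min_assoc]

theorem runMin_cons (x : Int) (xs : List Int) :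
    runMin (x :: xs) = x :: (runMin xs).map (fun v => min x v) := by
  cases xs with
  | nil => simp [runMin, scanMin]
  | cons y ys =>
      simp only [runMin, List.map_cons, scanMin]
      have : (if y < x then y else x) = min x y := by
        rw [min_def]; split_ifs <;> omega
      rw [this, map_min_scanMin]

-- the tail state of B's loop: running minima of the suffix starting at i
def tailT (A : List Int) (i : Nat) : List Int :=
  runMin ((List.range' i (A.length - i)).map (fun j => A.getD j 0))

theorem tailT_succ (A : List Int) (i : Nat) (h : i < A.length) :
    tailT A i = A.getD i 0 :: (tailT A (i + 1)).map (fun v => min (A.getD i 0) v) := by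
  unfold tailT
  have : A.length - i = (A.length - (i + 1)) + 1 := by omega
  rw [this, List.range'_succ, List.map_cons, runMin_cons]

-- rowC is the sentinel prefix plus the suffix minima
theorem rowC_eq_tailT (A : List Int) (i : Nat) (h : i < A.length) :
    rowC A i = List.replicate i (50000000 : Int) ++ tailT A i := by
  unfold rowC
  rw [tailT_succ A i h]
  unfold tailT runMin
  cases hm : (List.range' (i + 1) (A.length - (i + 1))).map (fun j => A.getD j 0) with
  | nil => simp [scanMin]
  | cons y ys =>
      have : scanMin (A.getD i 0) (y :: ys)
          = (y :: scanMin y ys).map (fun v => min (A.getD i 0) v) := by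
        simp only [scanMin, List.map_cons]
        have h1 : (if y < A.getD i 0 then y else A.getD i 0) = min (A.getD i 0) y := by
          rw [min_def]; split_ifs <;> omega
        rw [h1, map_min_scanMin]
      rw [this]

-- B's descending loop, characterised
theorem B_loop (A : List Int) : ∀ (i : Nat), i ≤ A.length → ∀ (R : List (List Int)),
    ((List.range i).reverse.foldl
      (fun (st : List Int × List (List Int)) i =>
        let tail := A.getD i 0 :: st.1.map (fun v => min (A.getD i 0) v)
        (tail, st.2 ++ [List.replicate i (50000000 : Int) ++ tail]))
      (tailT A i, R)).2
    = R ++ (((List.range i).map (rowC A)).reverse) := by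
  intro i
  induction i with
  | zero => intro _ R; simp
  | succ i ih =>
      intro h R
      rw [List.range_succ, List.reverse_append, List.reverse_singleton]
      simp only [List.singleton_append, List.foldl_cons]
      have ht : A.getD i 0 :: (tailT A (i + 1)).map (fun v => min (A.getD i 0) v)
          = tailT A i := (tailT_succ A i (by omega)).symm
      rw [ht]
      rw [ih (by omega)]
      rw [← rowC_eq_tailT A i (by omega)]
      rw [List.map_append, List.reverse_append]
      simp

theorem process_alt_eq_rowC (A : List Int) :
    process_alt A = (List.range A.length).map (rowC A) := by
  unfold process_alt
  simp only []
  have h0 : tailT A A.length = [] := by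
    unfold tailT
    simp [runMin]
  have := B_loop A A.length (le_refl _) []
  rw [h0] at this
  rw [this]
  simp

-- ===== VERDICT (by name: the statement is the Claim_ definition above) =====
theorem process_spec : Claim_equal_process := by
  intro A _
  unfold Spec_process
  rw [process_eq_rowC, process_alt_eq_rowC]
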